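-- pv_equiv track=rewrite | github.com/GowthamSagar310/Competitive-Programming-Problems | 801B.py | solve
-- ===== SOURCE A (Python) =====
-- def solve(x, y):
--     z = ""
--     for i in range(len(x)):
--         if x[i] > y[i]:
--             z += y[i]
--         elif x[i] < y[i]:
--             return -1
--         else:
--             z += x[i]
--     return z
-- ===== SOURCE B (Python) =====
-- def solve(x, y):
--     # validation pass: same left-to-right order as A, same IndexError when y is too short
--     if any(x[i] < y[i] for i in range(len(x))):
--         return -1
--     return y[:len(x)]
-- ===== Notes on version B (the rewrite author's own statement) =====
-- stated objective: simpler
-- what changed: Replaces A's char-by-char min-accumulation with a single left-to-right validation pass (any) followed by one slice y[:len(x)], using the fact that every emitted character equals y[i].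
-- outside the precondition, e.g. on solve('a', 'b'): A returns -1, B returns -1
import Mathlib
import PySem

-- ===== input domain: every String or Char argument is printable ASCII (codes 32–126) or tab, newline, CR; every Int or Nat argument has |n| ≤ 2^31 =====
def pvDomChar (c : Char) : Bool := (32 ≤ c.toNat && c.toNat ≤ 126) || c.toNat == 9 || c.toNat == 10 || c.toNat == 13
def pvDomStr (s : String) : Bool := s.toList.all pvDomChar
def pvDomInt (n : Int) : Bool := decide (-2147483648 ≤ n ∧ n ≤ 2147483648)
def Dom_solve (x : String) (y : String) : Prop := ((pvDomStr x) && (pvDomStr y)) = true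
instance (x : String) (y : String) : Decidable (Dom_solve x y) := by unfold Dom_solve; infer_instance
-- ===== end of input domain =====

-- B replaces A's char-by-char min-accumulation with one validation pass plus a slice y[:len(x)]; objective: simpler.

-- ===== PORT A =====
-- A's loop over i in range(len(x)); 'none' encodes the non-string exits (return -1, IndexError),
-- both of which lie outside Pre_solve; z is the accumulated string.
def solveLoop : List Char → List Char → List Char → Option (List Char)
  | [], _, z => some z
  | _ :: _, [], _ => none                         -- y[i] raises IndexError
  | a :: xs, b :: ys, z =>
    if b < a then solveLoop xs ys (z ++ [b])      -- x[i] > y[i]: z += y[i]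
    else if a < b then none                       -- x[i] < y[i]: return -1 (not a string)
    else solveLoop xs ys (z ++ [a])               -- z += x[i]

def solve (x : String) (y : String) : String :=
  match solveLoop x.toList y.toList [] with
  | some z => String.mk z
  | none => ""                                    -- unreachable inside Pre_solve

-- ===== PORT B =====
-- Source B: if any(x[i] < y[i] for i in range(len(x))): return -1; return y[:len(x)]
-- the 'true'/"" arms encode the non-string exits (IndexError / return -1), outside Pre_solve.
def solve_alt (x : String) (y : String) : String :=
  if (List.range x.toList.length).any (fun i =>
       match PySem.List.pyGet? x.toList (i : Int), PySem.List.pyGet? y.toList (i : Int) with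
       | some a, some b => a < b
       | _, _ => true)
  then ""
  else String.mk (PySem.List.slice y.toList none (some (x.toList.length : Int)))

-- ===== PRECONDITION & SPEC =====
-- Pre_ excludes exactly the inputs on which A does not return a string: it returns the int -1
-- (when some x[i] < y[i]) or raises IndexError (when y is shorter than x); B behaves identically there.
def Pre_solve (x : String) (y : String) : Prop :=
  x.toList.length ≤ y.toList.length ∧ ∀ p ∈ x.toList.zip y.toList, p.2 ≤ p.1
instance (x : String) (y : String) : Decidable (Pre_solve x y) := by unfold Pre_solve; infer_instance

def pvWitness_solve : String × String := ("ba", "aa")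

def Spec_solve (x : String) (y : String) (out : String) : Prop := out = solve_alt x y
instance (x : String) (y : String) (out : String) : Decidable (Spec_solve x y out) := by unfold Spec_solve; infer_instance

-- ===== CLAIM =====
def Claim_equal_solve : Prop := ∀ (x : String) (y : String), Dom_solve x y → Pre_solve x y → Spec_solve x y (solve x y)

-- ===== LEMMAS AND PROOFS =====

-- Under Pre_, A's loop returns the accumulator followed by the first |xs| chars of ys.
theorem solveLoop_eq (xs ys : List Char) (z : List Char)
    (hlen : xs.length ≤ ys.length) (h : ∀ p ∈ xs.zip ys, p.2 ≤ p.1) :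
    solveLoop xs ys z = some (z ++ ys.take xs.length) := by
  induction xs generalizing ys z with
  | nil => simp [solveLoop]
  | cons a xs ih =>
    cases ys with
    | nil => simp at hlen
    | cons b ys =>
      have hba : b ≤ a := h (a, b) (by simp)
      have htail : ∀ p ∈ xs.zip ys, p.2 ≤ p.1 := fun p hp => h p (by simp [hp])
      have hlen' : xs.length ≤ ys.length := by simpa using hlen
      by_cases hlt : b < a
      · simp [solveLoop, hlt, ih ys (z ++ [b]) hlen' htail]
      · have hab : ¬ a < b := not_lt.mpr hba
        have hbe : b = a := le_antisymm hba (not_lt.mp hlt)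
        simp [solveLoop, ih ys (z ++ [a]) hlen' htail, hbe]

-- Under Pre_, B's validation pass finds no index with x[i] < y[i].
theorem any_false (x y : String) (h : Pre_solve x y) :
    (List.range x.toList.length).any (fun i =>
       match PySem.List.pyGet? x.toList (i : Int), PySem.List.pyGet? y.toList (i : Int) with
       | some a, some b => a < b
       | _, _ => true) = false := by
  obtain ⟨hlen, hall⟩ := h
  rw [List.any_eq_false]
  intro i hi
  rw [List.mem_range] at hi
  have hiy : i < y.toList.length := lt_of_lt_of_le hi hlen
  rw [PySem.List.pyGet?_natCast, PySem.List.pyGet?_natCast,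
     List.getElem?_eq_getElem hi, List.getElem?_eq_getElem hiy]
  have : y.toList[i] ≤ x.toList[i] := by
    have := hall (x.toList[i], y.toList[i])
      (by rw [List.mem_iff_getElem]; exact ⟨i, by rw [List.length_zip]; omega, by simp⟩)
    simpa using this
  simpa using not_lt.mpr this

-- ===== VERDICT =====
theorem solve_spec : Claim_equal_solve := by
  intro x y _ hpre
  unfold Spec_solve solve solve_alt
  rw [any_false x y hpre, solveLoop_eq x.toList y.toList [] hpre.1 hpre.2]
  simp [PySem.List.slice_to_natCast]
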